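-- pv_equiv track=rewrite | github.com/alaaedineboulessane-ui/run | jour07-08/job01.py | forme
-- ===== SOURCE A (Python) =====
-- def forme(largeur, hauteur):
--     c = ""
--     for o in range(hauteur):
--         c += "|"
--         for i in range(largeur):
--             if  o == 0 or o == hauteur-1:
--                 c += "-"
--             else:
--                 c += " "
--         c += "|"
--         c += "\n"
--     return c
-- ===== SOURCE B (Python) =====
-- def forme(largeur, hauteur):
--     if hauteur <= 0:
--         return ""
--     border = "|" + "-" * largeur + "|\n"
--     interior = "|" + " " * largeur + "|\n"
--     return "".join(border if o == 0 or o == hauteur - 1 else interior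
--                    for o in range(hauteur))
-- ===== Notes on version B (the rewrite author's own statement) =====
-- stated objective: simpler
-- what changed: B precomputes the border and interior line strings once via string repetition and joins one line per row, replacing A's per-character inner loop and quadratic character-wise string accumulation.
import Mathlib
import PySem

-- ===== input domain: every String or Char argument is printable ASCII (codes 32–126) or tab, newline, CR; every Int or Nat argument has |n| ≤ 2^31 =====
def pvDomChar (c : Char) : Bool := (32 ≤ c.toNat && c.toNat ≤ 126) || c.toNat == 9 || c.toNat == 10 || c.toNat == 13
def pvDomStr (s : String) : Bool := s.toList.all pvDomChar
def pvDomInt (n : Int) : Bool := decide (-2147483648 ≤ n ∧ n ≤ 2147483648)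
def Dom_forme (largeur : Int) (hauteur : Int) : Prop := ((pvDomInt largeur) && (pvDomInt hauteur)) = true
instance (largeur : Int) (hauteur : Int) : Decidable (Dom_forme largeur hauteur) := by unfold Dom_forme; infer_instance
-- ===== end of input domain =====

-- B builds the two line strings once ('|' + '-'*largeur + '|\n' / the blank interior line) and joins
-- one line per row, instead of A's per-character inner loop; objective: simpler.

-- ===== PORT A =====
-- A accumulates a string character by character; ported on List Char (PySem convention), wrapped by String.ofList.
def formeChars (largeur : Int) (hauteur : Int) : List Char :=
  (PySem.List.pyRange 0 hauteur 1).foldl (fun c o =>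
    let c := c ++ ['|']
    let c := (PySem.List.pyRange 0 largeur 1).foldl (fun c _i =>
      if o == 0 || o == hauteur - 1 then c ++ ['-'] else c ++ [' ']) c
    let c := c ++ ['|']
    c ++ ['\n']) []

def forme (largeur : Int) (hauteur : Int) : String := String.ofList (formeChars largeur hauteur)

-- ===== PORT B =====
def formeAltChars (largeur : Int) (hauteur : Int) : List Char :=
  if hauteur ≤ 0 then [] else
  let border := ['|'] ++ PySem.List.pyRepeat ['-'] largeur ++ ['|', '\n']
  let interior := ['|'] ++ PySem.List.pyRepeat [' '] largeur ++ ['|', '\n']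
  PySem.Chars.join [] ((PySem.List.pyRange 0 hauteur 1).map (fun o =>
    if o == 0 || o == hauteur - 1 then border else interior))

def forme_alt (largeur : Int) (hauteur : Int) : String := String.ofList (formeAltChars largeur hauteur)

-- ===== PRECONDITION & SPEC =====
def Spec_forme (largeur : Int) (hauteur : Int) (out : String) : Prop := out = forme_alt largeur hauteur
instance (largeur : Int) (hauteur : Int) (out : String) : Decidable (Spec_forme largeur hauteur out) := by unfold Spec_forme; infer_instance

-- ===== CLAIM (what is proved, stated in full; the proofs are below) =====
def Claim_equal_forme : Prop := ∀ (largeur : Int) (hauteur : Int), Dom_forme largeur hauteur → Spec_forme largeur hauteur (forme largeur hauteur)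

-- ===== LEMMAS AND PROOFS =====

-- ''.join(parts) concatenates the parts.
theorem pv_join_nil_eq_flatten : ∀ (ps : List (List Char)), PySem.Chars.join [] ps = ps.flatten := by
  intro ps
  induction ps with
  | nil => rfl
  | cons p ps ih =>
    cases ps with
    | nil => simp [PySem.Chars.join, List.intercalate]
    | cons q qs =>
      rw [PySem.Chars.join_cons_cons]
      simp_all [PySem.Chars.join]

-- A's inner loop appends one fixed character per iteration.
theorem pv_inner_fold (cond : Bool) :
    ∀ (L : List Int) (acc : List Char),
      L.foldl (fun c (_ : Int) => if cond then c ++ ['-'] else c ++ [' ']) acc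
        = acc ++ List.replicate L.length (if cond then '-' else ' ') := by
  intro L
  induction L with
  | nil => intro acc; simp
  | cons x xs ih =>
    intro acc
    simp only [List.foldl_cons, List.length_cons, List.replicate_succ, ih]
    cases cond <;> simp

-- each row of A (appended to the accumulator c) is the corresponding precomputed line of B
theorem pv_row_eq (largeur hauteur o : Int) (c : List Char) :
    ((PySem.List.pyRange 0 largeur 1).foldl (fun c (_i : Int) =>
       if o == 0 || o == hauteur - 1 then c ++ ['-'] else c ++ [' ']) (c ++ ['|'])) ++ ['|'] ++ ['\n']
      = c ++ (if o == 0 || o == hauteur - 1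
          then ['|'] ++ PySem.List.pyRepeat ['-'] largeur ++ ['|', '\n']
          else ['|'] ++ PySem.List.pyRepeat [' '] largeur ++ ['|', '\n']) := by
  rw [pv_inner_fold]
  simp only [PySem.List.pyRepeat_singleton, PySem.List.length_pyRange_one]
  cases h : (o == 0 || o == hauteur - 1) <;> simp

theorem pv_chars_eq (largeur hauteur : Int) :
    formeChars largeur hauteur = formeAltChars largeur hauteur := by
  unfold formeChars formeAltChars
  by_cases h0 : hauteur ≤ 0
  · simp [h0, PySem.List.pyRange_one_eq_nil h0]
  rw [if_neg h0, pv_join_nil_eq_flatten]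
  have hbody : (fun (c : List Char) (o : Int) =>
        let c := c ++ ['|']
        let c := (PySem.List.pyRange 0 largeur 1).foldl (fun c (_i : Int) =>
          if o == 0 || o == hauteur - 1 then c ++ ['-'] else c ++ [' ']) c
        let c := c ++ ['|']
        c ++ ['\n'])
      = (fun (c : List Char) (o : Int) => c ++
          (if o == 0 || o == hauteur - 1
            then ['|'] ++ PySem.List.pyRepeat ['-'] largeur ++ ['|', '\n']
            else ['|'] ++ PySem.List.pyRepeat [' '] largeur ++ ['|', '\n'])) := by
    funext c o
    exact pv_row_eq largeur hauteur o c
  rw [hbody, PySem.List.foldl_append_eq_flatMap]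
  simp [List.flatMap_def]

-- ===== VERDICT (by name: the statement is the Claim_ definition above) =====
theorem forme_spec : Claim_equal_forme := by
  intro largeur hauteur _
  unfold Spec_forme forme forme_alt
  rw [pv_chars_eq]
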